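-- pv_equiv track=rewrite | github.com/siddu-fungible/discovey | tools/Spirent_TestCenter_4.81/Spirent_TestCenter_Application_Linux/Methodology/Scripts/data_processors.py | process_prefix_length_dist_input
-- ===== SOURCE A (Python) =====
-- def process_prefix_length_dist_input(dist_list, is_ipv4):
--     '''
--     This data process will convert a python list of tuples (dist_list), where
--     each tuple is in the form [prefix_length, percent] into a native BLL property
--     form for prefix length distribution lists. A tuple with 0 percent
--     value is not required (for an optimized list).  The prefix lengths
--     begin at 1 and end at either 32 or 128. For example:
--
--             [["25", "35"], ["28", "25"], ["31", "20"], ["32", "20"]]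
--
--     The result is a single string containing all the distribution
--     values (percentages) in order of their prefix length. Where no
--     prefix length is provided, a 0 is used. For example, the following
--     string is the transformation of the list above, and contains a total
--     of 32 numbers (assumes is_ipv4 is true):
--
--     "0 0 0 0 0 0 0 0 0 0 0 0 0 0 0 0 0 0 0 0 0 0 0 0 35 0 0 25 0 0 20 20"
--
--     is_ipv4 is true if the string should have 32 values, or false if
--     it should have 128 values.
--
--     If any prefix length is invalid, a message will be returned indicating
--     which prefix lengths are invalid for the IP version chosen.
--
--     If the values do not total exactly 100 (for 100%), then a message will
--     be returned indicating the total is not valid.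
--     '''
--
--     # Note any prefix lengths that are invalid...
--     invalid_prefix_lengths = []
--     # Convert the list of tuples into a dictionary...
--     d = {}
--     for (prefix, length) in [(int(p), int(l)) for (p, l) in dist_list]:
--         if prefix in d:
--             return '', 'Duplicate prefix length of ' + str(prefix) + ' found'
--         if prefix < 1 or prefix > (32 if is_ipv4 else 128):
--             invalid_prefix_lengths.append(prefix)
--         else:
--             d[prefix] = length
--     # Build the output string, using 0s and overriding with values that are in the dictionary...
--     transformed_value = ''
--     # Track the total distribution for all prefix lengths provided...
--     total = 0
--     for i in range(0, 32 if is_ipv4 else 128):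
--         if (i + 1) in d:
--             transformed_value = transformed_value + str(d[i + 1]) + ' '
--             total += d[i + 1]
--         else:
--             transformed_value = transformed_value + '0 '
--     err = None
--     if len(invalid_prefix_lengths) > 0:
--         err = 'Found invalid prefix lengths: ' + ' '.join([str(a) for a in invalid_prefix_lengths])
--     elif total != 100:
--         err = 'Total distribution of prefix lengths is ' + str(total) + \
--               '; distribution values must add to 100 (%)'
--     return transformed_value, err
-- ===== SOURCE B (Python) =====
-- def process_prefix_length_dist_input(dist_list, is_ipv4):
--     # Staged pipeline: partition into invalid/valid prefixes, scan for the first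
--     # duplicate, then sort the valid pairs and emit runs of zeros between them
--     # (sort-and-merge), instead of a dict pass plus a per-position lookup loop.
--     n = 32 if is_ipv4 else 128
--     pairs = [(int(p), int(l)) for (p, l) in dist_list]
--     invalid = [p for (p, l) in pairs if p < 1 or p > n]
--     valid = [(p, l) for (p, l) in pairs if 1 <= p <= n]
--     prefixes = [p for (p, l) in valid]
--     for i, p in enumerate(prefixes):
--         if p in prefixes[:i]:
--             return '', 'Duplicate prefix length of ' + str(p) + ' found'
--     parts = []
--     prev = 0
--     total = 0
--     for p, l in sorted(valid, key=lambda pl: pl[0]):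
--         parts += ['0'] * (p - 1 - prev)
--         parts.append(str(l))
--         total += l
--         prev = p
--     parts += ['0'] * (n - prev)
--     transformed_value = ' '.join(parts) + ' '
--     err = None
--     if invalid:
--         err = 'Found invalid prefix lengths: ' + ' '.join(str(a) for a in invalid)
--     elif total != 100:
--         err = 'Total distribution of prefix lengths is ' + str(total) + \
--               '; distribution values must add to 100 (%)'
--     return transformed_value, err
-- ===== Notes on version B (the rewrite author's own statement) =====
-- stated objective: alternative
-- what changed: Replaces A's single dict-building pass plus per-position dict-lookup gather loop with a staged pipeline: partition into invalid/valid prefixes, a slice-membership scan for the first duplicate, then sort the valid pairs and merge them with runs of zeros between consecutive prefixes.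
import Mathlib
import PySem

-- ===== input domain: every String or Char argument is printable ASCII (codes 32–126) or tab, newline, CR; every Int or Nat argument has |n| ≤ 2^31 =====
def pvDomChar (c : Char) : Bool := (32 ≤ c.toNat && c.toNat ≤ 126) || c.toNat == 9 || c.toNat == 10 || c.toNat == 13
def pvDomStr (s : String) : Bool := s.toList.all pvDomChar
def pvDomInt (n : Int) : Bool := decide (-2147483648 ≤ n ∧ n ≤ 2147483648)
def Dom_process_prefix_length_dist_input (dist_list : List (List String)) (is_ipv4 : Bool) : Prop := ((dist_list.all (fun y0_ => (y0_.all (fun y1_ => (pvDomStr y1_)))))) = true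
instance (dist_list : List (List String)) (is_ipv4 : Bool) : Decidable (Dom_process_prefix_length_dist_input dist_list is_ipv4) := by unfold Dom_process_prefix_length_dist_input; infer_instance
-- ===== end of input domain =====

-- B replaces A's dict pass + per-position dict-lookup loop by a staged pipeline:
-- partition into invalid/valid, a slice-membership scan for the first duplicate,
-- then sort the valid pairs and merge them with runs of zeros (objective: alternative).

-- ===== PORT A =====
-- the comprehension [(int(p), int(l)) for (p, l) in dist_list]; int() is PySem.Int.ofStr?
-- (under Pre_ every row has 2 entries and both parse, so the `.getD` defaults are never used)
def pvToPairs (dist_list : List (List String)) : List (Int × Int) :=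
  dist_list.map (fun row =>
    ((PySem.Int.ofStr? (row.getD 0 "")).getD 0, (PySem.Int.ofStr? (row.getD 1 "")).getD 0))

-- A's first loop: duplicate check, then range check, else insert into the dict
def pvALoop1 (bound : Int) :
    List (Int × Int) → List Int → PySem.Dict Int Int → (List Int × PySem.Dict Int Int) ⊕ String
  | [], inv, d => .inl (inv, d)
  | (pfx, len) :: rest, inv, d =>
    if d.contains pfx then
      .inr ("Duplicate prefix length of " ++ PySem.Int.toStr pfx ++ " found")
    else if pfx < 1 ∨ bound < pfx then
      pvALoop1 bound rest (inv ++ [pfx]) d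
    else
      pvALoop1 bound rest inv (d.insert pfx len)

-- A's second loop: for i in range(0, n): append value-or-0, accumulate total
def pvALoop2 (d : PySem.Dict Int Int) : List Int → String → Int → String × Int
  | [], tv, total => (tv, total)
  | i :: rest, tv, total =>
    if d.contains (i + 1) then
      pvALoop2 d rest (tv ++ PySem.Int.toStr (d.getD (i + 1) 0) ++ " ") (total + d.getD (i + 1) 0)
    else
      pvALoop2 d rest (tv ++ "0 ") total

def process_prefix_length_dist_input (dist_list : List (List String)) (is_ipv4 : Bool) :
    String × Option String :=
  match pvALoop1 (if is_ipv4 then 32 else 128) (pvToPairs dist_list) [] PySem.Dict.empty with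
  | .inr e => ("", some e)
  | .inl (invalid_prefix_lengths, d) =>
    let r := pvALoop2 d (PySem.List.pyRange 0 (if is_ipv4 then 32 else 128)) "" 0
    let err : Option String :=
      if invalid_prefix_lengths.length > 0 then
        some ("Found invalid prefix lengths: " ++
          PySem.Str.join " " (invalid_prefix_lengths.map PySem.Int.toStr))
      else if r.2 ≠ 100 then
        some ("Total distribution of prefix lengths is " ++ PySem.Int.toStr r.2 ++
          "; distribution values must add to 100 (%)")
      else none
    (r.1, err)

-- ===== PORT B =====
-- B's duplicate scan: `for i, p in enumerate(prefixes): if p in prefixes[:i]` —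
-- the accumulator IS the slice prefixes[:i]
def pvBDup : List Int → List Int → Option Int
  | _, [] => none
  | acc, p :: rest => if p ∈ acc then some p else pvBDup (acc ++ [p]) rest

-- B's sort-merge loop: emit a run of zeros up to each sorted prefix, then its value
def pvBMerge : List (Int × Int) → List String → Int → Int → List String × Int × Int
  | [], parts, total, prev => (parts, total, prev)
  | (p, l) :: rest, parts, total, prev =>
    pvBMerge rest (parts ++ List.replicate (p - 1 - prev).toNat "0" ++ [PySem.Int.toStr l])
      (total + l) p

def process_prefix_length_dist_input_alt (dist_list : List (List String)) (is_ipv4 : Bool) :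
    String × Option String :=
  let n : Int := if is_ipv4 then 32 else 128
  let pairs := pvToPairs dist_list
  let invalid := (pairs.filter (fun pl => decide (pl.1 < 1) || decide (n < pl.1))).map (·.1)
  let valid := pairs.filter (fun pl => decide (1 ≤ pl.1) && decide (pl.1 ≤ n))
  match pvBDup [] (valid.map (·.1)) with
  | some p => ("", some ("Duplicate prefix length of " ++ PySem.Int.toStr p ++ " found"))
  | none =>
    let r := pvBMerge (PySem.List.sorted valid (fun pl => pl.1) false) [] 0 0
    let parts := r.1 ++ List.replicate (n - r.2.2).toNat "0"
    let transformed_value := PySem.Str.join " " parts ++ " "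
    let err : Option String :=
      if invalid ≠ [] then
        some ("Found invalid prefix lengths: " ++ PySem.Str.join " " (invalid.map PySem.Int.toStr))
      else if r.2.1 ≠ 100 then
        some ("Total distribution of prefix lengths is " ++ PySem.Int.toStr r.2.1 ++
          "; distribution values must add to 100 (%)")
      else none
    (transformed_value, err)

-- ===== PRECONDITION & SPEC =====
-- Pre_ excludes exactly the inputs where Python A raises: a row that is not a 2-tuple
-- (unpacking raises ValueError) or an entry int() cannot parse (ValueError).
def Pre_process_prefix_length_dist_input (dist_list : List (List String)) (is_ipv4 : Bool) : Prop :=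
  ∀ row ∈ dist_list, row.length = 2 ∧ (PySem.Int.ofStr? (row.getD 0 "")).isSome = true ∧
    (PySem.Int.ofStr? (row.getD 1 "")).isSome = true
instance (dist_list : List (List String)) (is_ipv4 : Bool) : Decidable (Pre_process_prefix_length_dist_input dist_list is_ipv4) := by unfold Pre_process_prefix_length_dist_input; infer_instance

def pvWitness_process_prefix_length_dist_input : List (List String) × Bool :=
  ([["25", "35"], ["28", "25"], ["31", "20"], ["32", "20"]], true)

def Spec_process_prefix_length_dist_input (dist_list : List (List String)) (is_ipv4 : Bool) (out : String × Option String) : Prop := out = process_prefix_length_dist_input_alt dist_list is_ipv4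
instance (dist_list : List (List String)) (is_ipv4 : Bool) (out : String × Option String) : Decidable (Spec_process_prefix_length_dist_input dist_list is_ipv4 out) := by unfold Spec_process_prefix_length_dist_input; infer_instance

-- ===== CLAIM (what is proved, stated in full; the proofs are below) =====
def Claim_equal_process_prefix_length_dist_input : Prop := ∀ (dist_list : List (List String)) (is_ipv4 : Bool), Dom_process_prefix_length_dist_input dist_list is_ipv4 → Pre_process_prefix_length_dist_input dist_list is_ipv4 → Spec_process_prefix_length_dist_input dist_list is_ipv4 (process_prefix_length_dist_input dist_list is_ipv4)

-- ===== LEMMAS AND PROOFS =====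

-- association-list lookup: the value paired with key k (first match)
def pvALook (l : List (Int × Int)) (k : Int) : Option Int :=
  (l.find? (fun pl => pl.1 == k)).map (·.2)

-- the token / piece / value A's gather loop emits for index i, given a lookup function
def pvTokenOf (g : Int → Option Int) (i : Int) : String :=
  match g (i + 1) with | some v => PySem.Int.toStr v | none => "0"
def pvValOf (g : Int → Option Int) (i : Int) : Int := (g (i + 1)).getD 0

-- the Bool filters B uses
def pvValidP (n : Int) (pl : Int × Int) : Bool := decide (1 ≤ pl.1) && decide (pl.1 ≤ n)
def pvInvP (n : Int) (pl : Int × Int) : Bool := decide (pl.1 < 1) || decide (n < pl.1)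

lemma pvLoop1_char (n : Int) : ∀ (pairs : List (Int × Int)) (acc inv : List Int)
    (d : PySem.Dict Int Int),
    (∀ x : Int, x ∈ acc ↔ d.contains x = true) →
    (∀ x : Int, d.contains x = true → 1 ≤ x ∧ x ≤ n) →
    pvALoop1 n pairs inv d =
      match pvBDup acc ((pairs.filter (pvValidP n)).map (·.1)) with
      | some p => .inr ("Duplicate prefix length of " ++ PySem.Int.toStr p ++ " found")
      | none => .inl (inv ++ (pairs.filter (pvInvP n)).map (·.1),
          (pairs.filter (pvValidP n)).foldl (fun d pl => d.insert pl.1 pl.2) d) := by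
  intro pairs
  induction pairs with
  | nil => intro acc inv d _ _; simp [pvALoop1, pvBDup]
  | cons pl rest ih =>
    obtain ⟨p, l⟩ := pl
    intro acc inv d hacc hbnd
    by_cases hv : 1 ≤ p ∧ p ≤ n
    · have hvP : pvValidP n (p, l) = true := by simp [pvValidP]; omega
      have hiP : pvInvP n (p, l) = false := by simp [pvInvP]; omega
      by_cases hc : d.contains p = true
      · have hpacc : p ∈ acc := (hacc p).mpr hc
        rw [List.filter_cons_of_pos hvP]
        simp only [pvALoop1, if_pos hc, List.map_cons, pvBDup, if_pos hpacc]
      · have hpacc : p ∉ acc := fun hmem => hc ((hacc p).mp hmem)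
        have hr : ¬ (p < 1 ∨ n < p) := by omega
        have hacc' : ∀ x : Int, x ∈ acc ++ [p] ↔ (d.insert p l).contains x = true := by
          intro x
          rw [PySem.Dict.contains_insert]
          simp only [List.mem_append, List.mem_singleton, hacc x, Bool.or_eq_true, beq_iff_eq]
          tauto
        have hbnd' : ∀ x : Int, (d.insert p l).contains x = true → 1 ≤ x ∧ x ≤ n := by
          intro x hx
          rw [PySem.Dict.contains_insert] at hx
          rcases Bool.or_eq_true_iff.mp hx with h1 | h2
          · have : x = p := by simpa using h1
            omega
          · exact hbnd x h2
        rw [List.filter_cons_of_pos hvP, List.filter_cons_of_neg (by simp [hiP])]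
        simp only [pvALoop1, if_neg hc, if_neg hr, List.map_cons, pvBDup, if_neg hpacc,
          List.foldl_cons]
        exact ih (acc ++ [p]) inv (d.insert p l) hacc' hbnd'
    · have hvP : pvValidP n (p, l) = false := by simp [pvValidP]; omega
      have hiP : pvInvP n (p, l) = true := by simp [pvInvP]; omega
      have hc : ¬ d.contains p = true := fun hx => hv (hbnd p hx)
      have hr : p < 1 ∨ n < p := by omega
      rw [List.filter_cons_of_neg (by simp [hvP]), List.filter_cons_of_pos hiP]
      simp only [pvALoop1, if_neg hc, if_pos hr, List.map_cons]
      rw [ih acc (inv ++ [p]) d hacc hbnd]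
      cases pvBDup acc ((rest.filter (pvValidP n)).map (·.1)) with
      | some q => rfl
      | none => simp

lemma pvBDup_none_nodup : ∀ (l acc : List Int), acc.Nodup → pvBDup acc l = none →
    (acc ++ l).Nodup := by
  intro l
  induction l with
  | nil => intro acc h _; simpa using h
  | cons p rest ih =>
    intro acc hacc hnone
    rw [pvBDup] at hnone
    by_cases hp : p ∈ acc
    · rw [if_pos hp] at hnone; exact absurd hnone (by simp)
    · rw [if_neg hp] at hnone
      have hacc' : (acc ++ [p]).Nodup := by
        simp only [List.nodup_append, List.nodup_cons, List.not_mem_nil, not_false_iff,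
          List.nodup_nil, and_true, true_and]
        refine ⟨hacc, ?_⟩
        intro a ha b hb
        simp only [List.mem_singleton] at hb
        subst hb
        exact fun h => hp (h ▸ ha)
      have := ih (acc ++ [p]) hacc' hnone
      simpa [List.append_assoc] using this


lemma pvALook_eq_none_iff (l : List (Int × Int)) (k : Int) :
    pvALook l k = none ↔ ∀ pl ∈ l, pl.1 ≠ k := by
  simp [pvALook, List.find?_eq_none]

lemma pvALook_eq_some_iff (l : List (Int × Int)) (k v : Int) (h : (l.map (·.1)).Nodup) :
    pvALook l k = some v ↔ (k, v) ∈ l := by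
  constructor
  · intro hsome
    rw [pvALook] at hsome
    obtain ⟨pl, hf, hv⟩ := Option.map_eq_some_iff.mp hsome
    have hmem := List.mem_of_find?_eq_some hf
    have hkey : pl.1 = k := by simpa using List.find?_some hf
    have : pl = (k, v) := Prod.ext hkey hv
    exact this ▸ hmem
  · intro hmem
    cases hfind : l.find? (fun pl => pl.1 == k) with
    | none =>
      exfalso
      exact absurd (List.find?_eq_none.mp hfind _ hmem) (by simp)
    | some pl =>
      have hm2 := List.mem_of_find?_eq_some hfind
      have hk : pl.1 = k := by simpa using List.find?_some hfind
      have hpl : pl = (k, v) :=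
        List.inj_on_of_nodup_map h hm2 hmem (by simpa using hk)
      rw [pvALook, hfind, hpl]
      rfl

lemma pvALook_perm (l₁ l₂ : List (Int × Int)) (h : l₁.Perm l₂) (hn : (l₂.map (·.1)).Nodup)
    (k : Int) : pvALook l₁ k = pvALook l₂ k := by
  have hn1 : (l₁.map (·.1)).Nodup := ((h.map (·.1)).nodup_iff).mpr hn
  cases h2 : pvALook l₂ k with
  | some v =>
    exact (pvALook_eq_some_iff l₁ k v hn1).mpr (h.mem_iff.mpr ((pvALook_eq_some_iff l₂ k v hn).mp h2))
  | none =>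
    rw [pvALook_eq_none_iff] at h2 ⊢
    intro pl hpl
    exact h2 pl (h.mem_iff.mp hpl)

lemma pvGetFold : ∀ (vs : List (Int × Int)) (d : PySem.Dict Int Int) (k : Int),
    (vs.map (·.1)).Nodup →
    (vs.foldl (fun d pl => d.insert pl.1 pl.2) d).get? k = (pvALook vs k).or (d.get? k) := by
  intro vs
  induction vs with
  | nil => intro d k _; simp [pvALook]
  | cons pl rest ih =>
    obtain ⟨p, l⟩ := pl
    intro d k hnd
    rw [List.map_cons, List.nodup_cons] at hnd
    obtain ⟨hpnot, hrest⟩ := hnd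
    rw [List.foldl_cons, ih (d.insert p l) k hrest]
    by_cases hk : p = k
    · subst hk
      have h1 : pvALook ((p, l) :: rest) p = some l := by
        simp [pvALook, List.find?]
      have h2 : pvALook rest p = none := by
        rw [pvALook_eq_none_iff]
        intro ql hq hqk
        exact hpnot (hqk ▸ List.mem_map_of_mem (f := fun pl => pl.1) hq)
      rw [h1, h2, PySem.Dict.get?_insert_self]
      rfl
    · have hf : List.find? (fun pl => pl.1 == k) ((p, l) :: rest) =
          List.find? (fun pl => pl.1 == k) rest := by
        rw [List.find?_cons_of_neg]
        simpa using hk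
      have h1 : pvALook ((p, l) :: rest) k = pvALook rest k := by
        rw [pvALook, hf]
        rfl
      rw [h1, PySem.Dict.get?_insert_of_ne d l (fun h => hk h.symm)]

lemma pvGF (n : Int) : ∀ (S : List (Int × Int)) (prev : Int) (parts : List String) (total : Int),
    S.Pairwise (fun a b => a.1 < b.1) → (∀ pl ∈ S, prev < pl.1 ∧ pl.1 ≤ n) → prev ≤ n →
    (pvBMerge S parts total prev).1 ++
        List.replicate (n - (pvBMerge S parts total prev).2.2).toNat "0"
      = parts ++ (PySem.List.pyRange prev n).map (pvTokenOf (pvALook S))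
    ∧ (pvBMerge S parts total prev).2.1
      = total + ((PySem.List.pyRange prev n).map (pvValOf (pvALook S))).sum := by
  intro S
  induction S with
  | nil =>
    intro prev parts total _ _ hprev
    have hc : ∀ i ∈ PySem.List.pyRange prev n, pvTokenOf (pvALook []) i = "0" := fun i _ => rfl
    have hv : ∀ i ∈ PySem.List.pyRange prev n, pvValOf (pvALook []) i = 0 := fun i _ => rfl
    refine ⟨?_, ?_⟩
    · rw [pvBMerge, List.map_congr_left hc, List.map_const', PySem.List.length_pyRange_one]
    · rw [pvBMerge, List.map_congr_left hv]
      simp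
  | cons pl rest ih =>
    obtain ⟨p, l⟩ := pl
    intro prev parts total hpw hbnd hprev
    obtain ⟨hp1, hp2⟩ := hbnd (p, l) List.mem_cons_self
    have hp1' : prev < p := hp1
    have hp2' : p ≤ n := hp2
    obtain ⟨hhead, htail⟩ := List.pairwise_cons.mp hpw
    have hbnd' : ∀ pl ∈ rest, p < pl.1 ∧ pl.1 ≤ n :=
      fun q hq => ⟨hhead q hq, (hbnd q (List.mem_cons_of_mem _ hq)).2⟩
    obtain ⟨ihs, iht⟩ :=
      ih p (parts ++ List.replicate (p - 1 - prev).toNat "0" ++ [PySem.Int.toStr l])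
        (total + l) htail hbnd' hp2'
    have hpp : p - 1 + 1 = p := by omega
    have hsplit : PySem.List.pyRange prev n =
        PySem.List.pyRange prev (p - 1) ++ ((p - 1) :: PySem.List.pyRange p n) := by
      rw [PySem.List.pyRange_one_append prev (p - 1) n (by omega) (by omega),
        PySem.List.pyRange_one_cons (a := p - 1) (b := n) (by omega), hpp]
    have h0tok : (PySem.List.pyRange prev (p - 1)).map (pvTokenOf (pvALook ((p, l) :: rest)))
        = List.replicate (p - 1 - prev).toNat "0" := by
      have hc : ∀ i ∈ PySem.List.pyRange prev (p - 1),
          pvTokenOf (pvALook ((p, l) :: rest)) i = "0" := by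
        intro i hi
        rw [PySem.List.mem_pyRange_one] at hi
        have hnone : pvALook ((p, l) :: rest) (i + 1) = none := by
          rw [pvALook_eq_none_iff]
          intro q hq
          rcases List.mem_cons.mp hq with rfl | hq2
          · simp only []
            omega
          · have := hbnd' q hq2
            omega
        rw [pvTokenOf, hnone]
      rw [List.map_congr_left hc, List.map_const', PySem.List.length_pyRange_one]
    have h0val : ∀ i ∈ PySem.List.pyRange prev (p - 1),
        pvValOf (pvALook ((p, l) :: rest)) i = 0 := by
      intro i hi
      rw [PySem.List.mem_pyRange_one] at hi
      have hnone : pvALook ((p, l) :: rest) (i + 1) = none := by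
        rw [pvALook_eq_none_iff]
        intro q hq
        rcases List.mem_cons.mp hq with rfl | hq2
        · simp only []
          omega
        · have := hbnd' q hq2
          omega
      rw [pvValOf, hnone]
      rfl
    have hself : pvALook ((p, l) :: rest) (p - 1 + 1) = some l := by
      rw [hpp]
      simp [pvALook, List.find?]
    have htokself : pvTokenOf (pvALook ((p, l) :: rest)) (p - 1) = PySem.Int.toStr l := by
      rw [pvTokenOf, hself]
    have hvalself : pvValOf (pvALook ((p, l) :: rest)) (p - 1) = l := by
      rw [pvValOf, hself]
      rfl
    have htailEq : ∀ i ∈ PySem.List.pyRange p n,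
        pvALook ((p, l) :: rest) (i + 1) = pvALook rest (i + 1) := by
      intro i hi
      rw [PySem.List.mem_pyRange_one] at hi
      have hf : List.find? (fun pl => pl.1 == i + 1) ((p, l) :: rest) =
          List.find? (fun pl => pl.1 == i + 1) rest := by
        rw [List.find?_cons_of_neg]
        simp only [beq_iff_eq]
        show ¬ p = i + 1
        omega
      rw [pvALook, hf]
      rfl
    have h2tok : (PySem.List.pyRange p n).map (pvTokenOf (pvALook ((p, l) :: rest)))
        = (PySem.List.pyRange p n).map (pvTokenOf (pvALook rest)) := by
      apply List.map_congr_left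
      intro i hi
      rw [pvTokenOf, pvTokenOf, htailEq i hi]
    have h2val : (PySem.List.pyRange p n).map (pvValOf (pvALook ((p, l) :: rest)))
        = (PySem.List.pyRange p n).map (pvValOf (pvALook rest)) := by
      apply List.map_congr_left
      intro i hi
      rw [pvValOf, pvValOf, htailEq i hi]
    refine ⟨?_, ?_⟩
    · rw [pvBMerge, ihs, hsplit, List.map_append, List.map_cons, h0tok, htokself, h2tok]
      simp [List.append_assoc]
    · rw [pvBMerge, iht, hsplit, List.map_append, List.map_cons, List.sum_append, List.sum_cons,
        hvalself, h2val]
      have hz : ((PySem.List.pyRange prev (p - 1)).map (pvValOf (pvALook ((p, l) :: rest)))).sum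
          = 0 := by
        rw [List.map_congr_left h0val]
        simp
      rw [hz]
      ring

-- A's second loop in closed form
def pvPiece (d : PySem.Dict Int Int) (i : Int) : String :=
  if d.contains (i + 1) then PySem.Int.toStr (d.getD (i + 1) 0) ++ " " else "0 "
def pvVal (d : PySem.Dict Int Int) (i : Int) : Int :=
  if d.contains (i + 1) then d.getD (i + 1) 0 else 0

lemma pvALoop2_eq (d : PySem.Dict Int Int) (idx : List Int) : ∀ (tv : String) (total : Int),
    pvALoop2 d idx tv total =
      (List.foldl (· ++ ·) tv (idx.map (pvPiece d)), total + (idx.map (pvVal d)).sum) := by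
  induction idx with
  | nil => intro tv total; simp [pvALoop2]
  | cons i rest ih =>
    intro tv total
    by_cases h : d.contains (i + 1) = true
    · simp only [pvALoop2, List.map_cons, List.foldl_cons, List.sum_cons, ih, pvPiece, pvVal]
      rw [if_pos h, if_pos h, if_pos h, Prod.mk.injEq]
      constructor
      · rw [String.append_assoc]
      · ring
    · simp only [pvALoop2, List.map_cons, List.foldl_cons, List.sum_cons, ih, pvPiece, pvVal]
      rw [if_neg h, if_neg h, if_neg h, Prod.mk.injEq]
      exact ⟨rfl, by ring⟩

lemma pvPiece_eq (d : PySem.Dict Int Int) (i : Int) :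
    pvPiece d i = pvTokenOf (fun k => d.get? k) i ++ " " := by
  rw [pvPiece, pvTokenOf, PySem.Dict.contains_eq_isSome_get?, PySem.Dict.getD_eq_get?_getD]
  cases d.get? (i + 1) <;> simp

lemma pvVal_eq (d : PySem.Dict Int Int) (i : Int) :
    pvVal d i = pvValOf (fun k => d.get? k) i := by
  rw [pvVal, pvValOf, PySem.Dict.contains_eq_isSome_get?, PySem.Dict.getD_eq_get?_getD]
  cases d.get? (i + 1) <;> simp

lemma pvFoldl_toList (l : List String) : ∀ (s : String),
    (List.foldl (· ++ ·) s l).toList = s.toList ++ (l.map String.toList).flatten := by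
  induction l with
  | nil => intro s; simp
  | cons a rest ih => intro s; simp [ih, String.toList_append]

lemma pvIntercalateSpace (css : List (List Char)) (h : css ≠ []) :
    List.intercalate [' '] css ++ [' '] = (css.map (· ++ [' '])).flatten := by
  induction css with
  | nil => exact absurd rfl h
  | cons c t ih =>
    cases t with
    | nil => simp [List.intercalate]
    | cons c2 t2 =>
      have ih2 := ih (by simp)
      have hcc : List.intercalate [' '] (c :: c2 :: t2) =
          c ++ [' '] ++ List.intercalate [' '] (c2 :: t2) := by
        simp [List.intercalate, List.intersperse]
      rw [hcc, List.map_cons, List.flatten_cons, ← ih2]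
      simp [List.append_assoc]

lemma pvJoinSpace (ts : List String) (h : ts ≠ []) :
    PySem.Str.join " " ts ++ " " = List.foldl (· ++ ·) "" (ts.map (· ++ " ")) := by
  rw [← String.toList_inj]
  rw [pvFoldl_toList]
  have hmap : (ts.map (· ++ " ")).map String.toList = ts.map (fun t => t.toList ++ [' ']) := by
    rw [List.map_map]
    apply List.map_congr_left
    intro t _
    simp [String.toList_append]
  have hne : ts.map String.toList ≠ [] := by
    simpa using h
  rw [hmap, String.toList_append]
  have hjoin : (PySem.Str.join " " ts).toList =
      List.intercalate [' '] (ts.map String.toList) := by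
    simp [PySem.Str.toList_join]
    rfl
  rw [hjoin]
  have := pvIntercalateSpace (ts.map String.toList) hne
  simp only [List.map_map] at this
  rw [show (" " : String).toList = [' '] by rfl] at *
  rw [this]
  rfl

-- the main body equality, for an arbitrary positive width n
lemma pvMain (dist_list : List (List String)) (n : Int) (hn : 0 < n) :
    (match pvALoop1 n (pvToPairs dist_list) [] PySem.Dict.empty with
     | .inr e => (("" : String), some e)
     | .inl (invalid_prefix_lengths, d) =>
       let r := pvALoop2 d (PySem.List.pyRange 0 n) "" 0
       let err : Option String :=
         if invalid_prefix_lengths.length > 0 then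
           some ("Found invalid prefix lengths: " ++
             PySem.Str.join " " (invalid_prefix_lengths.map PySem.Int.toStr))
         else if r.2 ≠ 100 then
           some ("Total distribution of prefix lengths is " ++ PySem.Int.toStr r.2 ++
             "; distribution values must add to 100 (%)")
         else none
       (r.1, err)) =
    (let pairs := pvToPairs dist_list
     let invalid := (pairs.filter (fun pl => decide (pl.1 < 1) || decide (n < pl.1))).map (·.1)
     let valid := pairs.filter (fun pl => decide (1 ≤ pl.1) && decide (pl.1 ≤ n))
     match pvBDup [] (valid.map (·.1)) with
     | some p => (("" : String), some ("Duplicate prefix length of " ++ PySem.Int.toStr p ++ " found"))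
     | none =>
       let r := pvBMerge (PySem.List.sorted valid (fun pl => pl.1) false) [] 0 0
       let parts := r.1 ++ List.replicate (n - r.2.2).toNat "0"
       let transformed_value := PySem.Str.join " " parts ++ " "
       let err : Option String :=
         if invalid ≠ [] then
           some ("Found invalid prefix lengths: " ++
             PySem.Str.join " " (invalid.map PySem.Int.toStr))
         else if r.2.1 ≠ 100 then
           some ("Total distribution of prefix lengths is " ++ PySem.Int.toStr r.2.1 ++
             "; distribution values must add to 100 (%)")
         else none
       (transformed_value, err)) := by
  have hcontains0 : ∀ x : Int, x ∈ ([] : List Int) ↔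
      (PySem.Dict.empty : PySem.Dict Int Int).contains x = true := by
    intro x
    simp [PySem.Dict.contains_empty]
  have hbnd0 : ∀ x : Int, (PySem.Dict.empty : PySem.Dict Int Int).contains x = true →
      1 ≤ x ∧ x ≤ n := by
    intro x hx
    rw [PySem.Dict.contains_empty] at hx
    exact absurd hx (by simp)
  have hA := pvLoop1_char n (pvToPairs dist_list) [] [] PySem.Dict.empty hcontains0 hbnd0
  have hvPf : (fun pl : Int × Int => decide (1 ≤ pl.1) && decide (pl.1 ≤ n)) = pvValidP n := rfl
  have hiPf : (fun pl : Int × Int => decide (pl.1 < 1) || decide (n < pl.1)) = pvInvP n := rfl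
  simp only [hvPf, hiPf, hA]
  cases hdup : pvBDup [] (((pvToPairs dist_list).filter (pvValidP n)).map (·.1)) with
  | some p => rfl
  | none =>
    have hnodup : (((pvToPairs dist_list).filter (pvValidP n)).map (·.1)).Nodup := by
      simpa using
        pvBDup_none_nodup (((pvToPairs dist_list).filter (pvValidP n)).map (·.1)) []
          List.nodup_nil hdup
    set valid := (pvToPairs dist_list).filter (pvValidP n) with hvalid
    set dfinal := valid.foldl (fun d pl => d.insert pl.1 pl.2) PySem.Dict.empty with hdfinal
    set S := PySem.List.sorted valid (fun pl => pl.1) false with hSdef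
    have hperm : S.Perm valid := PySem.List.sorted_perm valid (fun pl => pl.1) false
    have hSnodup : (S.map (·.1)).Nodup := ((hperm.map (·.1)).nodup_iff).mpr hnodup
    have hlookS : ∀ k, pvALook S k = pvALook valid k := pvALook_perm S valid hperm hnodup
    have hfun : (fun k => dfinal.get? k) = pvALook S := by
      funext k
      rw [hdfinal, pvGetFold valid PySem.Dict.empty k hnodup, PySem.Dict.get?_empty, hlookS]
      cases pvALook valid k <;> rfl
    have hSpw : S.Pairwise (fun a b => a.1 < b.1) := by
      have hle : S.Pairwise (fun a b => a.1 ≤ b.1) := PySem.List.sorted_pairwise valid (fun pl => pl.1)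
      have hne : S.Pairwise (fun a b => a.1 ≠ b.1) := List.pairwise_map.mp hSnodup
      exact (hle.and hne).imp (fun h => lt_of_le_of_ne h.1 h.2)
    have hSbnd : ∀ pl ∈ S, 0 < pl.1 ∧ pl.1 ≤ n := by
      intro q hq
      have hqv : q ∈ valid := (PySem.List.mem_sorted valid (fun pl => pl.1) false q).mp hq
      have := (List.mem_filter.mp hqv).2
      rw [pvValidP] at this
      simp only [Bool.and_eq_true, decide_eq_true_eq] at this
      omega
    obtain ⟨hGs, hGt⟩ := pvGF n S 0 [] 0 hSpw hSbnd (le_of_lt hn)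
    have hparts : (pvBMerge S [] 0 0).1 ++
        List.replicate (n - (pvBMerge S [] 0 0).2.2).toNat "0"
        = (PySem.List.pyRange 0 n).map (pvTokenOf (pvALook S)) := by
      simpa using hGs
    have hptot : (pvBMerge S [] 0 0).2.1
        = ((PySem.List.pyRange 0 n).map (pvValOf (pvALook S))).sum := by
      simpa using hGt
    have hne : (PySem.List.pyRange 0 n).map (pvTokenOf (pvALook S)) ≠ [] := by
      intro hnil
      have := congrArg List.length hnil
      rw [List.length_map, PySem.List.length_pyRange_one] at this
      simp at this
      omega
    have htv : (pvALoop2 dfinal (PySem.List.pyRange 0 n) "" 0).1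
        = PySem.Str.join " " ((pvBMerge S [] 0 0).1 ++
            List.replicate (n - (pvBMerge S [] 0 0).2.2).toNat "0") ++ " " := by
      rw [pvALoop2_eq, hparts, pvJoinSpace _ hne]
      show List.foldl (· ++ ·) "" ((PySem.List.pyRange 0 n).map (pvPiece dfinal))
          = List.foldl (· ++ ·) ""
              (((PySem.List.pyRange 0 n).map (pvTokenOf (pvALook S))).map (· ++ " "))
      rw [List.map_map]
      congr 1
      apply List.map_congr_left
      intro i _
      rw [pvPiece_eq]
      simp only [Function.comp]
      rw [hfun]
    have htot : (pvALoop2 dfinal (PySem.List.pyRange 0 n) "" 0).2 = (pvBMerge S [] 0 0).2.1 := by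
      rw [pvALoop2_eq, hptot]
      show (0 : Int) + ((PySem.List.pyRange 0 n).map (pvVal dfinal)).sum
          = ((PySem.List.pyRange 0 n).map (pvValOf (pvALook S))).sum
      rw [zero_add]
      congr 1
      apply List.map_congr_left
      intro i _
      rw [pvVal_eq, hfun]
    refine Prod.ext ?_ ?_
    · exact htv
    · show (if ((List.map (fun x => x.1) (List.filter (pvInvP n) (pvToPairs dist_list)))).length > 0
          then some ("Found invalid prefix lengths: " ++ PySem.Str.join " "
            ((List.map (fun x => x.1) (List.filter (pvInvP n) (pvToPairs dist_list))).map PySem.Int.toStr))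
          else if (pvALoop2 dfinal (PySem.List.pyRange 0 n) "" 0).2 ≠ 100 then
            some ("Total distribution of prefix lengths is " ++
              PySem.Int.toStr (pvALoop2 dfinal (PySem.List.pyRange 0 n) "" 0).2 ++
              "; distribution values must add to 100 (%)")
          else none)
        = (if (List.map (fun x => x.1) (List.filter (pvInvP n) (pvToPairs dist_list))) ≠ [] then
            some ("Found invalid prefix lengths: " ++ PySem.Str.join " "
              ((List.map (fun x => x.1) (List.filter (pvInvP n) (pvToPairs dist_list))).map PySem.Int.toStr))
          else if (pvBMerge S [] 0 0).2.1 ≠ 100 then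
            some ("Total distribution of prefix lengths is " ++
              PySem.Int.toStr (pvBMerge S [] 0 0).2.1 ++
              "; distribution values must add to 100 (%)")
          else none)
      rw [htot]
      simp only [gt_iff_lt, List.length_pos_iff, ne_eq]

-- ===== VERDICT (by name: the statement is the Claim_ definition above) =====
theorem process_prefix_length_dist_input_spec : Claim_equal_process_prefix_length_dist_input := by
  intro dist_list is_ipv4 _ _
  unfold Spec_process_prefix_length_dist_input
  unfold process_prefix_length_dist_input process_prefix_length_dist_input_alt
  cases is_ipv4
  · exact pvMain dist_list 128 (by norm_num)
  · exact pvMain dist_list 32 (by norm_num)
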